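-- pv_equiv track=rewrite | github.com/EsosaOrumwese/fraud-detection-system | packages/engine/src/engine/layers/l1/seg_3B/s2_edge_catalogue/runner.py | _allocate_edges_int
-- ===== SOURCE A (Python) =====
-- def _allocate_edges_int(weights: dict[int, int], total_edges: int) -> dict[int, int]:
--     total_weight = sum(weights.values())
--     if total_weight <= 0:
--         raise ValueError("tile weights sum to zero")
--     allocations: dict[int, int] = {}
--     remainders: list[tuple[int, int]] = []
--     for tile_id, weight in weights.items():
--         scaled = total_edges * weight
--         base = scaled // total_weight
--         allocations[tile_id] = int(base)
--         remainders.append((scaled - base * total_weight, tile_id))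
--     remaining = total_edges - sum(allocations.values())
--     if remaining > 0:
--         remainders.sort(key=lambda item: (-item[0], item[1]))
--         for idx in range(remaining):
--             allocations[remainders[idx][1]] += 1
--     return allocations
-- ===== SOURCE B (Python) =====
-- def _allocate_edges_int(weights: dict[int, int], total_edges: int) -> dict[int, int]:
--     total_weight = sum(weights.values())
--     if total_weight <= 0:
--         raise ValueError("tile weights sum to zero")
--     rems = [(tile_id, (total_edges * weight) % total_weight)
--             for tile_id, weight in weights.items()]
--     # sum of remainders is an exact multiple of total_weight; its quotient is
--     # exactly the number of leftover edges to hand out.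
--     remaining = sum(r for _, r in rems) // total_weight
--     out: dict[int, int] = {}
--     for tile_id, weight in weights.items():
--         r = (total_edges * weight) % total_weight
--         # a tile gets one extra edge iff fewer than `remaining` tiles precede
--         # it in the (-remainder, tile_id) order (no sort: count predecessors)
--         rank = sum(1 for tid2, r2 in rems if r2 > r or (r2 == r and tid2 < tile_id))
--         out[tile_id] = (total_edges * weight) // total_weight + (1 if rank < remaining else 0)
--     return out
-- ===== Notes on version B (the rewrite author's own statement) =====
-- stated objective: alternative
-- what changed: B drops A's sort-the-remainders-and-bump-a-prefix pass: it computes the leftover count directly as sum(remainders)//total_weight and gives each tile its +1 iff the tile's predecessor count in the (-remainder, tile_id) order is below that count, so no sorted list or index loop exists.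
-- outside the precondition, e.g. on _allocate_edges_int({}, 5): A raises ValueError, B raises ValueError
import Mathlib
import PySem

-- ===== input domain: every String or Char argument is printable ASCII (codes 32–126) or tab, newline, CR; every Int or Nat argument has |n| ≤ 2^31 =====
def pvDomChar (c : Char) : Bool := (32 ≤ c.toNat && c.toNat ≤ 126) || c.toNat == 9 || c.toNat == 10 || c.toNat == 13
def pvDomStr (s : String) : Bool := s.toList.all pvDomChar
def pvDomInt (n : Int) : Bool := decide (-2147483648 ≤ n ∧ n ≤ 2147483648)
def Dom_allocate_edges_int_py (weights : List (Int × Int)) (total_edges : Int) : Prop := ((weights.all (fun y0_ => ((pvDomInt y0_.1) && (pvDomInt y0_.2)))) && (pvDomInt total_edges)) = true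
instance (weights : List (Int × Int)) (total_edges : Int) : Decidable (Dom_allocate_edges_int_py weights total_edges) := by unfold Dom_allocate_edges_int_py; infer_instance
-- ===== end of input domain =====

-- B replaces A's sort of the remainders and prefix walk by a per-tile predecessor count in the
-- (-remainder, tile_id) order (objective: alternative algorithm, no sort; not claimed faster).

-- ===== PORT A =====
def allocate_edges_int_py (weights : List (Int × Int)) (total_edges : Int) : List (Int × Int) :=
  let total_weight := (weights.map (fun p => p.2)).sum
  if total_weight ≤ 0 then []  -- Python raises ValueError here; excluded by Pre_
  else
    let st := weights.foldl
      (fun (st : PySem.Dict Int Int × List (Int × Int)) p =>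
        let scaled := total_edges * p.2
        let base := PySem.Int.floordiv scaled total_weight
        (st.1.insert p.1 base, st.2 ++ [(scaled - base * total_weight, p.1)]))
      (PySem.Dict.empty, [])
    let allocations := st.1
    let remainders := st.2
    let remaining := total_edges - allocations.values.sum
    if remaining > 0 then
      -- remainders.sort(key=lambda item: (-item[0], item[1]))
      let sortedRems := PySem.List.sorted2 remainders (fun item => -item.1) (fun item => item.2)
      -- allocations[remainders[idx][1]] += 1 ; the index is in range and the key present
      -- (0 < remaining ≤ len(remainders), proved below), so pyGetD/modify are exact here
      ((PySem.List.pyRange 0 remaining 1).foldl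
        (fun a idx => a.modify (PySem.List.pyGetD sortedRems idx (0, 0)).2 0 (· + 1))
        allocations).items
    else allocations.items

-- ===== PORT B =====
def allocate_edges_int_py_alt (weights : List (Int × Int)) (total_edges : Int) : List (Int × Int) :=
  let total_weight := (weights.map (fun p => p.2)).sum
  if total_weight ≤ 0 then []  -- raise ValueError
  else
    let rems := weights.map (fun p => (p.1, PySem.Int.mod (total_edges * p.2) total_weight))
    let remaining := PySem.Int.floordiv ((rems.map (fun q => q.2)).sum) total_weight
    (weights.foldl
      (fun (out : PySem.Dict Int Int) p =>
        let r := PySem.Int.mod (total_edges * p.2) total_weight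
        let rank : Int :=
          (rems.countP (fun q => decide (r < q.2) || (q.2 == r && decide (q.1 < p.1))) : Int)
        out.insert p.1
          (PySem.Int.floordiv (total_edges * p.2) total_weight
            + (if rank < remaining then 1 else 0)))
      PySem.Dict.empty).items

-- ===== PRECONDITION & SPEC =====
-- A raises ValueError when the weights sum to ≤ 0; and the Python argument is a dict, whose
-- keys are necessarily distinct, so association lists with duplicate keys are excluded.
def Pre_allocate_edges_int_py (weights : List (Int × Int)) (total_edges : Int) : Prop :=
  0 < (weights.map (fun p => p.2)).sum ∧ (weights.map (fun p => p.1)).Nodup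
instance (weights : List (Int × Int)) (total_edges : Int) : Decidable (Pre_allocate_edges_int_py weights total_edges) := by unfold Pre_allocate_edges_int_py; infer_instance

def pvWitness_allocate_edges_int_py : (List (Int × Int)) × Int := ([(3, 2), (1, 3), (7, 5)], 11)

def Spec_allocate_edges_int_py (weights : List (Int × Int)) (total_edges : Int) (out : List (Int × Int)) : Prop := out = allocate_edges_int_py_alt weights total_edges
instance (weights : List (Int × Int)) (total_edges : Int) (out : List (Int × Int)) : Decidable (Spec_allocate_edges_int_py weights total_edges out) := by unfold Spec_allocate_edges_int_py; infer_instance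

-- ===== CLAIM (what is proved, stated in full; the proofs are below) =====
def Claim_equal_allocate_edges_int_py : Prop := ∀ (weights : List (Int × Int)) (total_edges : Int), Dom_allocate_edges_int_py weights total_edges → Pre_allocate_edges_int_py weights total_edges → Spec_allocate_edges_int_py weights total_edges (allocate_edges_int_py weights total_edges)

-- ===== LEMMAS AND PROOFS =====

-- the sort key (-remainder, tile_id) as one lexicographic key
def pvKey (x : Int × Int) : Lex (Int × Int) := toLex (-x.1, x.2)

-- sorted2 with keys (-x.1) and (x.2) is sorted with the single lexicographic key pvKey
lemma sorted2_eq_sorted_pvKey (xs : List (Int × Int)) :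
    PySem.List.sorted2 xs (fun x => -x.1) (fun x => x.2) = PySem.List.sorted xs pvKey := by
  rw [PySem.List.sorted_eq_foldl_insertBy]
  unfold PySem.List.sorted2
  simp only [Bool.false_eq_true, if_false]
  have hbf : (fun (a b : Int × Int) => decide (-a.1 < -b.1) || (!decide (-b.1 < -a.1) && decide (a.2 < b.2)))
      = (fun (a b : Int × Int) => decide (pvKey a < pvKey b)) := by
    funext a b
    by_cases h1 : a.1 < b.1 <;> by_cases h2 : b.1 < a.1 <;> by_cases h3 : a.2 < b.2 <;>
      simp [pvKey, Prod.Lex.toLex_lt_toLex, h1, h2, h3] <;> omega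
  rw [hbf]

-- in a strictly key-increasing list, the predecessor count of S[i] is i
lemma countP_lt_pairwise {α κ : Type} [LinearOrder κ] (key : α → κ) (S : List α)
    (hp : S.Pairwise (fun a b => key a < key b)) {i : Nat} (hi : i < S.length) :
    S.countP (fun y => decide (key y < key S[i])) = i := by
  have hpg := List.pairwise_iff_getElem.mp hp
  generalize hc : key S[i] = c
  conv_lhs => rw [← List.take_append_drop i S]
  rw [List.countP_append]
  have h1 : (S.take i).countP (fun y => decide (key y < c)) = (S.take i).length := by
    apply List.countP_eq_length.mpr
    intro y hy
    obtain ⟨j, hj, rfl⟩ := List.getElem_of_mem hy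
    have hjlen : j < i := by simp at hj; omega
    simp only [List.getElem_take, decide_eq_true_eq]
    exact hc ▸ hpg j i (by omega) hi hjlen
  have h2 : (S.drop i).countP (fun y => decide (key y < c)) = 0 := by
    apply List.countP_eq_zero.mpr
    intro y hy
    obtain ⟨j, hj, rfl⟩ := List.getElem_of_mem hy
    have hjl : i + j < S.length := by simp at hj; omega
    rw [List.getElem_drop]
    simp only [decide_eq_true_eq, not_lt]
    rcases Nat.eq_zero_or_pos j with h0 | h0
    · subst h0; simp [← hc]
    · exact hc ▸ le_of_lt (hpg i (i + j) hi hjl (by omega))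
  rw [h1, h2, List.length_take]
  omega

-- in a strictly key-increasing list, S[i] lies in the m-prefix iff i < m
lemma getElem_mem_take_iff {α κ : Type} [LinearOrder κ] (key : α → κ) (S : List α)
    (hp : S.Pairwise (fun a b => key a < key b)) {i : Nat} (hi : i < S.length) (m : Nat) :
    S[i] ∈ S.take m ↔ i < m := by
  have hpg := List.pairwise_iff_getElem.mp hp
  constructor
  · intro h
    obtain ⟨j, hj, hEq⟩ := List.getElem_of_mem h
    have hjm : j < m := by simp at hj; omega
    have hjl : j < S.length := by simp at hj; omega
    rw [List.getElem_take] at hEq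
    have : j = i := by
      by_contra hne
      rcases Nat.lt_or_ge j i with hlt | hge
      · exact absurd (hEq ▸ hpg j i hjl hi hlt) (lt_irrefl _)
      · have : i < j := by omega
        have := hpg i j hi hjl this
        rw [hEq] at this
        exact absurd this (lt_irrefl _)
    omega
  · intro h
    have hlen : i < (S.take m).length := by simp; omega
    have := List.getElem_mem hlen
    rwa [List.getElem_take] at this

-- a modify loop whose keys are all present leaves the key list unchanged
lemma keys_foldl_modify_pairs (T : List (Int × Int)) :
    ∀ (d : PySem.Dict Int Int), (∀ q ∈ T, d.contains q.2 = true) →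
      (T.foldl (fun a q => a.modify q.2 0 (· + 1)) d).keys = d.keys := by
  induction T with
  | nil => intro d _; rfl
  | cons q T ih =>
    intro d h
    simp only [List.foldl_cons]
    rw [ih]
    · rw [PySem.Dict.keys_modify, PySem.Dict.keys_insert_of_contains _ _ (h q List.mem_cons_self)]
    · intro q' hq'
      rw [PySem.Dict.contains_modify]
      simp [h q' (List.mem_cons_of_mem _ hq')]

-- ===== VERDICT (by name: the statement is the Claim_ definition above) =====
theorem allocate_edges_int_py_spec : Claim_equal_allocate_edges_int_py := by
  intro ws te hdom hpre
  obtain ⟨htw, hks⟩ := hpre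
  unfold Spec_allocate_edges_int_py
  simp only [allocate_edges_int_py, allocate_edges_int_py_alt]
  rw [if_neg (not_le.mpr htw), if_neg (not_le.mpr htw)]
  rw [PySem.List.foldl_prod_mk
    (fun (d : PySem.Dict Int Int) (p : Int × Int) =>
      d.insert p.1 (PySem.Int.floordiv (te * p.2) ((ws.map (fun p => p.2)).sum)))
    (fun (l : List (Int × Int)) (p : Int × Int) =>
      l ++ [(te * p.2 - PySem.Int.floordiv (te * p.2) ((ws.map (fun p => p.2)).sum) * ((ws.map (fun p => p.2)).sum), p.1)])
    ws PySem.Dict.empty []]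
  simp only [List.map_map, Function.comp_def]
  -- abbreviations
  have htw' : ¬ ((ws.map (fun p => p.2)).sum ≤ 0) := not_le.mpr htw
  -- the dict built by A's first loop
  have hItems : (ws.foldl (fun (d : PySem.Dict Int Int) p =>
        d.insert p.1 (PySem.Int.floordiv (te * p.2) ((ws.map (fun p => p.2)).sum)))
        PySem.Dict.empty).items
      = ws.map (fun p => (p.1, PySem.Int.floordiv (te * p.2) ((ws.map (fun p => p.2)).sum))) := by
    simpa using PySem.Dict.items_foldl_insert_fresh ws (fun p => p.1)
      (fun p => PySem.Int.floordiv (te * p.2) ((ws.map (fun p => p.2)).sum))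
      PySem.Dict.empty (by intro a _; exact PySem.Dict.contains_empty _) hks
  have hKeys : (ws.foldl (fun (d : PySem.Dict Int Int) p =>
        d.insert p.1 (PySem.Int.floordiv (te * p.2) ((ws.map (fun p => p.2)).sum)))
        PySem.Dict.empty).keys = ws.map (fun p => p.1) := by
    show ((ws.foldl _ PySem.Dict.empty).items.map (fun x => x.1)) = _
    rw [hItems, List.map_map]
    rfl
  have hVal : (ws.foldl (fun (d : PySem.Dict Int Int) p =>
        d.insert p.1 (PySem.Int.floordiv (te * p.2) ((ws.map (fun p => p.2)).sum)))
        PySem.Dict.empty).values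
      = ws.map (fun p => PySem.Int.floordiv (te * p.2) ((ws.map (fun p => p.2)).sum)) := by
    show ((ws.foldl _ PySem.Dict.empty).items.map (fun x => x.2)) = _
    rw [hItems, List.map_map]
    rfl
  -- A's remainder list
  have hRem : ws.foldl (fun (l : List (Int × Int)) p =>
        l ++ [(te * p.2 - PySem.Int.floordiv (te * p.2) ((ws.map (fun p => p.2)).sum)
               * ((ws.map (fun p => p.2)).sum), p.1)]) []
      = ws.map (fun p => (PySem.Int.mod (te * p.2) ((ws.map (fun p => p.2)).sum), p.1)) := by
    rw [PySem.List.foldl_append_singleton_eq_map]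
    simp only [List.nil_append]
    apply List.map_congr_left
    intro p _
    have := PySem.Int.floordiv_mul_add_mod (te * p.2) ((ws.map (fun p => p.2)).sum)
    rw [Prod.mk.injEq]
    exact ⟨by linarith, rfl⟩
  -- B's dict
  have hBitems : (ws.foldl (fun (out : PySem.Dict Int Int) p =>
        out.insert p.1
          (PySem.Int.floordiv (te * p.2) ((ws.map (fun p => p.2)).sum) +
            if ((ws.map (fun p => (p.1, PySem.Int.mod (te * p.2) ((ws.map (fun p => p.2)).sum)))).countP
                  (fun q => decide (PySem.Int.mod (te * p.2) ((ws.map (fun p => p.2)).sum) < q.2) ||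
                    (q.2 == PySem.Int.mod (te * p.2) ((ws.map (fun p => p.2)).sum) && decide (q.1 < p.1))) : Int)
                < PySem.Int.floordiv ((ws.map (fun p => PySem.Int.mod (te * p.2) ((ws.map (fun p => p.2)).sum))).sum)
                    ((ws.map (fun p => p.2)).sum) then 1 else 0))
        PySem.Dict.empty).items
      = ws.map (fun p => (p.1,
          PySem.Int.floordiv (te * p.2) ((ws.map (fun p => p.2)).sum) +
            if ((ws.map (fun p => (p.1, PySem.Int.mod (te * p.2) ((ws.map (fun p => p.2)).sum)))).countP
                  (fun q => decide (PySem.Int.mod (te * p.2) ((ws.map (fun p => p.2)).sum) < q.2) ||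
                    (q.2 == PySem.Int.mod (te * p.2) ((ws.map (fun p => p.2)).sum) && decide (q.1 < p.1))) : Int)
                < PySem.Int.floordiv ((ws.map (fun p => PySem.Int.mod (te * p.2) ((ws.map (fun p => p.2)).sum))).sum)
                    ((ws.map (fun p => p.2)).sum) then 1 else 0)) := by
    simpa using PySem.Dict.items_foldl_insert_fresh ws (fun p => p.1) _
      PySem.Dict.empty (by intro a _; exact PySem.Dict.contains_empty _) hks
  -- arithmetic: the sum of remainders is (remaining) * total_weight
  have hQ : (ws.map (fun p => PySem.Int.mod (te * p.2) ((ws.map (fun p => p.2)).sum))).sum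
      = (te - (ws.map (fun p => PySem.Int.floordiv (te * p.2) ((ws.map (fun p => p.2)).sum))).sum)
        * ((ws.map (fun p => p.2)).sum) := by
    have h1 : (ws.map (fun p => te * p.2)).sum = te * ((ws.map (fun p => p.2)).sum) :=
      List.sum_map_mul_left ws (fun p => p.2) te
    have h12 : (ws.map (fun p => te * p.2)).sum
        = (ws.map (fun p => PySem.Int.floordiv (te * p.2) ((ws.map (fun p => p.2)).sum)
            * ((ws.map (fun p => p.2)).sum)
            + PySem.Int.mod (te * p.2) ((ws.map (fun p => p.2)).sum))).sum := by
      apply congrArg List.sum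
      apply List.map_congr_left
      intro p _
      exact (PySem.Int.floordiv_mul_add_mod (te * p.2) ((ws.map (fun p => p.2)).sum)).symm
    rw [PySem.List.sum_map_add_int, List.sum_map_mul_right] at h12
    rw [h1] at h12
    linarith
  have hremB : PySem.Int.floordiv
        ((ws.map (fun p => PySem.Int.mod (te * p.2) ((ws.map (fun p => p.2)).sum))).sum)
        ((ws.map (fun p => p.2)).sum)
      = te - (ws.map (fun p => PySem.Int.floordiv (te * p.2) ((ws.map (fun p => p.2)).sum))).sum := by
    rw [hQ, PySem.Int.floordiv_eq_ediv_of_pos htw, Int.mul_ediv_cancel _ (ne_of_gt htw)]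
  rw [hBitems, hVal]
  by_cases hm : 0 < te - (ws.map (fun p => PySem.Int.floordiv (te * p.2) ((ws.map (fun p => p.2)).sum))).sum
  case neg =>
    rw [if_neg (by simpa using hm), hItems]
    apply List.map_congr_left
    intro p _
    have hc : ¬ ((((ws.map (fun p => (p.1, PySem.Int.mod (te * p.2) ((ws.map (fun p => p.2)).sum)))).countP
          (fun q => decide (PySem.Int.mod (te * p.2) ((ws.map (fun p => p.2)).sum) < q.2) ||
            (q.2 == PySem.Int.mod (te * p.2) ((ws.map (fun p => p.2)).sum) && decide (q.1 < p.1)))) : Int)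
          < PySem.Int.floordiv ((ws.map (fun p => PySem.Int.mod (te * p.2) ((ws.map (fun p => p.2)).sum))).sum)
              ((ws.map (fun p => p.2)).sum)) := by
      rw [hremB]
      have := Int.natCast_nonneg ((ws.map (fun p => (p.1, PySem.Int.mod (te * p.2) ((ws.map (fun p => p.2)).sum)))).countP
          (fun q => decide (PySem.Int.mod (te * p.2) ((ws.map (fun p => p.2)).sum) < q.2) ||
            (q.2 == PySem.Int.mod (te * p.2) ((ws.map (fun p => p.2)).sum) && decide (q.1 < p.1))))
      omega
    rw [if_neg hc, add_zero]
  case pos =>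
    rw [if_pos (by simpa using hm), hRem, sorted2_eq_sorted_pvKey, hremB]
    set tw := (ws.map (fun p => p.2)).sum with htwdef
    set m := te - (ws.map (fun p => PySem.Int.floordiv (te * p.2) tw)).sum with hmdef
    set remsA := ws.map (fun p => (PySem.Int.mod (te * p.2) tw, p.1)) with hremsdef
    set S := PySem.List.sorted remsA pvKey false with hSdef
    set D := ws.foldl (fun (d : PySem.Dict Int Int) p =>
        d.insert p.1 (PySem.Int.floordiv (te * p.2) tw)) PySem.Dict.empty with hDdef
    -- order facts about S
    have hSperm : S.Perm remsA := PySem.List.sorted_perm remsA pvKey false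
    have hSlen : S.length = ws.length := by
      rw [hSdef, PySem.List.length_sorted, hremsdef, List.length_map]
    have hsndS : (S.map (fun y => y.2)).Nodup := by
      have hperm2 := hSperm.map (fun y => y.2)
      have : remsA.map (fun y => y.2) = ws.map (fun p => p.1) := by
        rw [hremsdef, List.map_map]
        rfl
      rw [this] at hperm2
      exact (List.Perm.nodup_iff hperm2).mpr hks
    have hinj : Function.Injective pvKey := by
      intro x y h
      have h2 := toLex.injective h
      rw [Prod.mk.injEq] at h2
      obtain ⟨x1, x2⟩ := x
      obtain ⟨y1, y2⟩ := y
      simp only at h2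
      rw [Prod.mk.injEq]
      omega
    have hSnodup : S.Nodup := List.Nodup.of_map _ hsndS
    have hstrict : S.Pairwise (fun a b => pvKey a < pvKey b) := by
      have hle : S.Pairwise (fun a b => pvKey a ≤ pvKey b) := by
        rw [hSdef]; exact PySem.List.sorted_pairwise remsA pvKey
      have hne : S.Pairwise (fun a b => a ≠ b) := hSnodup
      exact (hle.and hne).imp (fun h => lt_of_le_of_ne h.1 (fun hk => h.2 (hinj hk)))
    -- arithmetic bounds on m
    have hm0 : 0 < m := hm
    have hn0 : 0 < ws.length := by
      rcases ws with _ | ⟨q, ws'⟩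
      · rw [htwdef] at htw; simp at htw
      · simp
    have hmlt : m < (ws.length : Int) := by
      have hmd_le : ∀ x ∈ ws.map (fun p => PySem.Int.mod (te * p.2) tw), x ≤ tw - 1 := by
        intro x hx
        obtain ⟨p, _, rfl⟩ := List.mem_map.mp hx
        have := PySem.Int.mod_lt (te * p.2) htw
        omega
      have hsum_le := List.sum_le_card_nsmul _ (tw - 1) hmd_le
      rw [List.length_map, nsmul_eq_mul, hQ] at hsum_le
      have hlen : (0 : Int) < (ws.length : Int) := by exact_mod_cast hn0
      nlinarith
    have hmnat : m.toNat ≤ S.length := by rw [hSlen]; omega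
    -- replace the index loop over range(m) by a fold over the m-prefix of S
    have hrange : PySem.List.pyRange 0 m = PySem.List.pyRange 0 ((S.take m.toNat).length : Int) := by
      rw [List.length_take]
      congr 1
      omega
    rw [hrange]
    rw [PySem.List.foldl_congr_mem _ _
      (fun a idx => a.modify (PySem.List.pyGetD (S.take m.toNat) idx ((0 : Int), (0 : Int))).2 0 (· + 1)) D
      (by
        intro acc idx hidx
        obtain ⟨h0, hlt⟩ := PySem.List.mem_pyRange_one.mp hidx
        have hlt' : idx < ((S.take m.toNat).length : Int) := hlt
        have hlt2 : idx < (S.length : Int) := by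
          rw [List.length_take] at hlt'
          push_cast at hlt' ⊢
          omega
        beta_reduce
        rw [PySem.List.pyGetD_eq_getElem S _ h0 hlt2,
          PySem.List.pyGetD_eq_getElem (S.take m.toNat) _ h0 hlt',
          List.getElem_take])]
    rw [PySem.List.foldl_pyRange_zero_pyGetD' (S.take m.toNat) ((0 : Int), (0 : Int))
      (fun acc q => acc.modify q.2 0 (· + 1)) D]
    -- the resulting dict: same keys, values bumped by the prefix count
    have hcontains : ∀ q ∈ S.take m.toNat, D.contains q.2 = true := by
      intro q hq
      have hqS : q ∈ S := List.take_subset _ _ hq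
      have hqA : q ∈ remsA := hSperm.subset hqS
      rw [hremsdef] at hqA
      obtain ⟨p, hp, rfl⟩ := List.mem_map.mp hqA
      rw [PySem.Dict.contains_iff_mem_keys, hKeys]
      exact List.mem_map_of_mem hp
    have hRkeys : ((S.take m.toNat).foldl (fun acc q => acc.modify q.2 0 (· + 1)) D).keys
        = ws.map (fun p => p.1) := by
      rw [keys_foldl_modify_pairs _ _ hcontains, hKeys]
    have hRnd : ((S.take m.toNat).foldl (fun acc q => acc.modify q.2 0 (· + 1)) D).keys.Nodup := by
      rw [hRkeys]; exact hks
    rw [PySem.Dict.items_eq_map_keys _ hRnd 0, hRkeys, List.map_map]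
    apply List.map_congr_left
    intro p hp
    simp only [Function.comp_def]
    -- value in A's dict
    have hget : ((S.take m.toNat).foldl (fun acc q => acc.modify q.2 0 (· + 1)) D).getD p.1 0
        = D.getD p.1 0 + (((S.take m.toNat).map (fun q => q.2)).count p.1 : Int) := by
      rw [show ((S.take m.toNat).foldl (fun acc q => acc.modify q.2 0 (· + 1)) D)
          = ((S.take m.toNat).map (fun q => q.2)).foldl (fun a x => a.modify x 0 (· + 1)) D from
          (List.foldl_map (f := fun q : Int × Int => q.2)
            (g := fun (a : PySem.Dict Int Int) (x : Int) => a.modify x 0 (· + 1))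
            (l := S.take m.toNat) (init := D)).symm]
      exact PySem.Dict.getD_foldl_modify_add_one _ _ _
    have hDget : D.getD p.1 0 = PySem.Int.floordiv (te * p.2) tw := by
      apply PySem.Dict.getD_of_mem_items D _ (by rw [hKeys]; exact hks)
      rw [hItems]
      exact List.mem_map_of_mem hp
    -- position of p's remainder pair in S
    have heS : (PySem.Int.mod (te * p.2) tw, p.1) ∈ S := by
      rw [hSdef]
      rw [PySem.List.mem_sorted, hremsdef]
      exact List.mem_map_of_mem hp
    obtain ⟨i, hiS, hSi⟩ := List.getElem_of_mem heS
    -- B's predecessor count equals that position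
    have hcnt : (ws.map (fun p' => (p'.1, PySem.Int.mod (te * p'.2) tw))).countP
          (fun q => decide (PySem.Int.mod (te * p.2) tw < q.2) ||
            (q.2 == PySem.Int.mod (te * p.2) tw && decide (q.1 < p.1))) = i := by
      have hS2 : S.countP (fun y => decide (pvKey y < pvKey S[i])) = i :=
        countP_lt_pairwise pvKey S hstrict hiS
      rw [hSi] at hS2
      rw [List.Perm.countP_eq _ hSperm, hremsdef, List.countP_map] at hS2
      rw [List.countP_map]
      rw [← hS2]
      apply List.countP_congr
      intro p' _
      simp only [Function.comp_def]
      by_cases h1 : PySem.Int.mod (te * p.2) tw < PySem.Int.mod (te * p'.2) tw <;>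
        by_cases h2 : PySem.Int.mod (te * p'.2) tw < PySem.Int.mod (te * p.2) tw <;>
        by_cases h3 : p'.1 < p.1 <;>
        simp [pvKey, Prod.Lex.toLex_lt_toLex, h1, h2, h3] <;> omega
    -- the prefix count is 1 exactly when the position is below m
    have hcount : (((S.take m.toNat).map (fun q => q.2)).count p.1 : Int)
        = if ((i : Int) < m) then 1 else 0 := by
      by_cases hil : (i : Int) < m
      · rw [if_pos hil]
        have hmem : S[i] ∈ S.take m.toNat :=
          (getElem_mem_take_iff pvKey S hstrict hiS m.toNat).mpr (by omega)
        rw [hSi] at hmem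
        have hnd : ((S.take m.toNat).map (fun q => q.2)).Nodup := by
          rw [List.map_take]
          exact ((S.map (fun q => q.2)).take_sublist m.toNat).nodup hsndS
        have hm2 : p.1 ∈ (S.take m.toNat).map (fun q => q.2) :=
          List.mem_map_of_mem hmem
        rw [List.count_eq_one_of_mem hnd hm2, Nat.cast_one]
      · rw [if_neg hil]
        have hnotmem : p.1 ∉ (S.take m.toNat).map (fun q => q.2) := by
          intro hmem
          obtain ⟨y, hyTm, hy2⟩ := List.mem_map.mp hmem
          have hyS : y ∈ S := List.take_subset _ _ hyTm
          have heSmem : (PySem.Int.mod (te * p.2) tw, p.1) ∈ S := heS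
          have hye : y = (PySem.Int.mod (te * p.2) tw, p.1) :=
            List.inj_on_of_nodup_map hsndS hyS heSmem hy2
          rw [hye, ← hSi] at hyTm
          have := (getElem_mem_take_iff pvKey S hstrict hiS m.toNat).mp hyTm
          omega
        rw [List.count_eq_zero.mpr hnotmem, Nat.cast_zero]
    rw [Prod.mk.injEq]
    refine ⟨rfl, ?_⟩
    rw [hget, hDget, hcnt, hcount]
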